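-- pv_equiv track=rewrite | github.com/yvv4git/rancid-more-dev | CloginrcFinder.py | FindAck
-- ===== SOURCE A (Python) =====
-- def FindAck(host_ip, list_acks):
-- 	login = None
-- 	paswd = None
-- 	enpaswd = None
-- 	for l in list_acks:
-- 		if (l[2] == host_ip):
-- 			if (l[1] == 'user'):
-- 				login = l[3]
-- 			elif (l[1] == 'password'):
-- 				if (l[4] != ''):
-- 					paswd = l[3]
-- 					enpaswd = l[4]
-- 				else:
-- 					paswd = l[3]
--
-- 	return login, paswd, enpaswd
-- ===== SOURCE B (Python) =====
-- def FindAck(host_ip, list_acks):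
-- 	matches = [l for l in list_acks if l[2] == host_ip]
-- 	logins = [l[3] for l in matches if l[1] == 'user']
-- 	paswds = [l[3] for l in matches if l[1] == 'password']
-- 	enpaswds = [l[4] for l in matches if l[1] == 'password' and l[4] != '']
-- 	login = logins[-1] if logins else None
-- 	paswd = paswds[-1] if paswds else None
-- 	enpaswd = enpaswds[-1] if enpaswds else None
-- 	return login, paswd, enpaswd
-- ===== Notes on version B (the rewrite author's own statement) =====
-- stated objective: simpler
-- what changed: Replaced the single fused stateful loop with three independent last-match selections over filtered comprehensions (filter host rows once, then pick the last user login, last password, and last non-empty enable password separately).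
import Mathlib
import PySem

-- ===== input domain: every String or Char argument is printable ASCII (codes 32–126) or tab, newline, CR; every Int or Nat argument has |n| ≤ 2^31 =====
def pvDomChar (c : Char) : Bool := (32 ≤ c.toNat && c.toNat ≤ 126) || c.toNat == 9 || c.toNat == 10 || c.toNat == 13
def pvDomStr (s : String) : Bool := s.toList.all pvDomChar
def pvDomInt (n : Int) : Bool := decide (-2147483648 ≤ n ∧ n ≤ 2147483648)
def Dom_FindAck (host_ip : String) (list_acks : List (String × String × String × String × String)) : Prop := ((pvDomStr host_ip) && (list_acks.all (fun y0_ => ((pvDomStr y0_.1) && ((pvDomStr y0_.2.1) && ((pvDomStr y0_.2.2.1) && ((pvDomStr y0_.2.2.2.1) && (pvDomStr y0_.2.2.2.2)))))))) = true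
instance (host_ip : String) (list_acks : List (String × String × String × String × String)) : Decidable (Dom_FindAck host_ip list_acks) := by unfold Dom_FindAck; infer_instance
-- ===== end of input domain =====

-- B replaces A's single fused stateful loop by three independent last-match selections
-- over filtered lists (objective: simpler decomposition; same return value).

-- ===== PORT A =====
-- one fused loop carrying (login, paswd, enpaswd); later matches overwrite earlier ones
def FindAck (host_ip : String) (list_acks : List (String × String × String × String × String)) : Option String × Option String × Option String :=
  list_acks.foldl
    (fun st l =>
      if l.2.2.1 == host_ip then
        if l.2.1 == "user" then
          (some l.2.2.2.1, st.2.1, st.2.2)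
        else if l.2.1 == "password" then
          if l.2.2.2.2 != "" then
            (st.1, some l.2.2.2.1, some l.2.2.2.2)
          else
            (st.1, some l.2.2.2.1, st.2.2)
        else st
      else st)
    (none, none, none)

-- ===== PORT B =====
-- filter host rows once, then each output is the last element of its own filtered list
def FindAck_alt (host_ip : String) (list_acks : List (String × String × String × String × String)) : Option String × Option String × Option String :=
  let hosts := list_acks.filter (fun l => l.2.2.1 == host_ip)
  let logins := (hosts.filter (fun l => l.2.1 == "user")).map (fun l => l.2.2.2.1)
  let paswds := (hosts.filter (fun l => l.2.1 == "password")).map (fun l => l.2.2.2.1)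
  let enpaswds := (hosts.filter (fun l => l.2.1 == "password" && l.2.2.2.2 != "")).map (fun l => l.2.2.2.2)
  (logins.getLast?, paswds.getLast?, enpaswds.getLast?)

-- ===== PRECONDITION & SPEC =====
def Spec_FindAck (host_ip : String) (list_acks : List (String × String × String × String × String)) (out : Option String × Option String × Option String) : Prop := out = FindAck_alt host_ip list_acks
instance (host_ip : String) (list_acks : List (String × String × String × String × String)) (out : Option String × Option String × Option String) : Decidable (Spec_FindAck host_ip list_acks out) := by unfold Spec_FindAck; infer_instance

-- ===== CLAIM (what is proved, stated in full; the proofs are below) =====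
def Claim_equal_FindAck : Prop := ∀ (host_ip : String) (list_acks : List (String × String × String × String × String)), Dom_FindAck host_ip list_acks → Spec_FindAck host_ip list_acks (FindAck host_ip list_acks)

-- ===== LEMMAS AND PROOFS =====

theorem getLast?_cons_or {α : Type} (a : α) (l : List α) :
    (a :: l).getLast? = l.getLast?.or (some a) := by
  cases l with
  | nil => rfl
  | cons b t =>
    rw [List.getLast?_cons_cons]
    cases h : (b :: t).getLast? with
    | none => simp at h
    | some v => rfl

-- loop invariant: the fold from any start state returns, componentwise,
-- the last element of the corresponding filtered list, falling back to the start state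
theorem FindAck_loop (host_ip : String)
    (xs : List (String × String × String × String × String))
    (s : Option String × Option String × Option String) :
    xs.foldl
      (fun st l =>
        if l.2.2.1 == host_ip then
          if l.2.1 == "user" then
            (some l.2.2.2.1, st.2.1, st.2.2)
          else if l.2.1 == "password" then
            if l.2.2.2.2 != "" then
              (st.1, some l.2.2.2.1, some l.2.2.2.2)
            else
              (st.1, some l.2.2.2.1, st.2.2)
          else st
        else st) s
    = ((((xs.filter (fun l => l.2.2.1 == host_ip)).filter (fun l => l.2.1 == "user")).map (fun l => l.2.2.2.1)).getLast?.or s.1,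
       (((xs.filter (fun l => l.2.2.1 == host_ip)).filter (fun l => l.2.1 == "password")).map (fun l => l.2.2.2.1)).getLast?.or s.2.1,
       (((xs.filter (fun l => l.2.2.1 == host_ip)).filter (fun l => l.2.1 == "password" && l.2.2.2.2 != "")).map (fun l => l.2.2.2.2)).getLast?.or s.2.2) := by
  induction xs generalizing s with
  | nil => rfl
  | cons x t ih =>
    obtain ⟨a0, a1, a2, a3, a4⟩ := x
    simp only [List.foldl_cons, List.filter_cons]
    rw [ih]
    by_cases h2 : a2 = host_ip
    · by_cases h1u : a1 = "user"
      · simp [h2, h1u, getLast?_cons_or]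
      · by_cases h1p : a1 = "password"
        · by_cases h4 : a4 = ""
          · simp [h2, h1p, h4, getLast?_cons_or]
          · simp [h2, h1p, h4, getLast?_cons_or]
        · simp [h2, h1u, h1p]
    · simp [h2]

-- ===== VERDICT (by name: the statement is the Claim_ definition above) =====
theorem FindAck_spec : Claim_equal_FindAck := by
  intro host_ip list_acks _
  show FindAck host_ip list_acks = FindAck_alt host_ip list_acks
  simp only [FindAck, FindAck_alt]
  rw [FindAck_loop]
  simp only [Option.or_none]
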